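-- pv_equiv track=rewrite | github.com/IgrMd/yandex-algos-training | Тренировки по алгоритмам 1.0/Лекция 3. «Множества»/F.py | genomes
-- ===== SOURCE A (Python) =====
-- from collections import defaultdict
--
-- def get_pairs(gen: str) -> dict[int]:
--     pairs = defaultdict(int)
--     for i in range(len(gen) - 1):
--         pairs[gen[i:i + 2]] += 1
--     return pairs
--
-- def genomes(gen1, gen2):
--     pairs1 = get_pairs(gen1)
--     pairs2 = get_pairs(gen2)
--
--     answer = 0
--     for pair, num in pairs1.items():
--         if pair in pairs2:
--             answer += num
--
--     return answer
-- ===== SOURCE B (Python) =====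
-- def genomes(gen1, gen2):
--     pairs2 = {gen2[i:i + 2] for i in range(len(gen2) - 1)}
--     answer = 0
--     for i in range(len(gen1) - 1):
--         if gen1[i:i + 2] in pairs2:
--             answer += 1
--     return answer
-- ===== Notes on version B (the rewrite author's own statement) =====
-- stated objective: simpler
-- what changed: B drops A's gen1 frequency-dict aggregation entirely: it builds only a set of gen2's bigrams and streams over gen1's positions once, counting positions whose bigram is in that set (equal because A's per-key sum of counts is the position count).
import Mathlib
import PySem

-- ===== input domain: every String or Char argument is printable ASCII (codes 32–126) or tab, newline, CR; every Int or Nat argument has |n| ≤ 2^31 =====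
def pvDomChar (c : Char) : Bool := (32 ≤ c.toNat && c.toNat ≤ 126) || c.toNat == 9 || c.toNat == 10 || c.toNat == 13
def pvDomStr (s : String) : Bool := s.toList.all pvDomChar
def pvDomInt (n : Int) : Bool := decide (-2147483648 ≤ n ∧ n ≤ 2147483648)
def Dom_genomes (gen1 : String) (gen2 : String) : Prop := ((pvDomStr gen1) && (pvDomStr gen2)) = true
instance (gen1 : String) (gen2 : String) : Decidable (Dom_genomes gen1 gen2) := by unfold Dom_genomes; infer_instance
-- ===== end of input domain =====

-- B drops A's gen1 frequency-dict aggregation: it builds only a set of gen2's bigrams and counts gen1 positions whose bigram is in it, in one pass (simpler decomposition, same cost).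


-- ===== PORT A =====
-- strings are handled on the List Char side (PySem convention); gen[i:i+2] is PySem.List.slice
-- get_pairs: defaultdict(int); for i in range(len(gen)-1): pairs[gen[i:i+2]] += 1
def pvGetPairs (gen : List Char) : PySem.Dict (List Char) Int :=
  (PySem.List.pyRange 0 (PySem.Chars.len gen - 1) 1).foldl
    (fun pairs i => pairs.modify (PySem.List.slice gen (some i) (some (i + 2))) 0 (· + 1))
    PySem.Dict.empty

def genomes (gen1 : String) (gen2 : String) : Int :=
  let pairs1 := pvGetPairs gen1.toList
  let pairs2 := pvGetPairs gen2.toList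
  pairs1.items.foldl
    (fun answer pv => if pairs2.contains pv.1 then answer + pv.2 else answer) 0

-- ===== PORT B =====
def genomes_alt (gen1 : String) (gen2 : String) : Int :=
  let pairs2 : PySem.Set (List Char) := PySem.Set.ofList
    ((PySem.List.pyRange 0 (PySem.Chars.len gen2.toList - 1) 1).map
      (fun i => PySem.List.slice gen2.toList (some i) (some (i + 2))))
  (PySem.List.pyRange 0 (PySem.Chars.len gen1.toList - 1) 1).foldl
    (fun answer i =>
      if pairs2.contains (PySem.List.slice gen1.toList (some i) (some (i + 2))) then answer + 1
      else answer) 0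

-- ===== PRECONDITION & SPEC =====
def Spec_genomes (gen1 : String) (gen2 : String) (out : Int) : Prop := out = genomes_alt gen1 gen2
instance (gen1 : String) (gen2 : String) (out : Int) : Decidable (Spec_genomes gen1 gen2 out) := by unfold Spec_genomes; infer_instance

-- ===== CLAIM (what is proved, stated in full; the proofs are below) =====
def Claim_equal_genomes : Prop := ∀ (gen1 : String) (gen2 : String), Dom_genomes gen1 gen2 → Spec_genomes gen1 gen2 (genomes gen1 gen2)

-- ===== LEMMAS AND PROOFS =====

-- the bigram list of a string, as both ports extract it
def pvBigs (cs : List Char) : List (List Char) :=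
  (PySem.List.pyRange 0 (PySem.Chars.len cs - 1) 1).map
    (fun i => PySem.List.slice cs (some i) (some (i + 2)))

lemma pvGetPairs_eq_counter (cs : List Char) :
    pvGetPairs cs = PySem.Dict.counter (pvBigs cs) := by
  simp [pvGetPairs, pvBigs, PySem.Dict.counter_eq_foldl, List.foldl_map]

-- the two List.count instances on List Char (BEq vs DecidableEq-derived) agree
lemma pvCount_inst (L1 : List (List Char)) (k : List Char) :
    @List.count (List Char) List.instBEq k L1 = @List.count (List Char) instBEqOfDecidableEq k L1 := by
  induction L1 with
  | nil => rfl
  | cons x t ih =>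
    rw [@List.count_cons _ List.instBEq, @List.count_cons _ instBEqOfDecidableEq, ih]
    congr 1
    simp

-- summing per-distinct-bigram counts over the kept keys = counting positions directly
lemma pvSum_count_eq_countP (L1 : List (List Char)) (p : List Char → Bool) :
    (((PySem.Set.ofList L1).filter p).map (fun k => (L1.count k : Int))).sum
      = (L1.countP p : Int) := by
  have hperm : (PySem.Set.ofList L1).Perm L1.dedup := by
    rw [List.perm_ext_iff_of_nodup (PySem.Set.nodup_ofList L1) L1.nodup_dedup]
    intro a
    rw [PySem.Set.mem_ofList, List.mem_dedup]
  have h := ((hperm.filter p).map (fun k => (L1.count k : Int))).sum_eq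
  rw [h, ← List.sum_map_count_dedup_filter_eq_countP p L1]
  push_cast
  rw [List.map_map]
  apply congrArg List.sum
  apply List.map_congr_left
  intro k _
  simp only [Function.comp_apply]
  congr 1
  exact pvCount_inst L1 k

lemma genomes_eq (gen1 gen2 : String) : genomes gen1 gen2 = genomes_alt gen1 gen2 := by
  have hA : genomes gen1 gen2
      = (((PySem.Set.ofList (pvBigs gen1.toList)).filter
            (fun k => decide (k ∈ pvBigs gen2.toList))).map
          (fun k => ((pvBigs gen1.toList).count k : Int))).sum := by
    show (pvGetPairs gen1.toList).items.foldl
        (fun answer pv => if (pvGetPairs gen2.toList).contains pv.1 then answer + pv.2 else answer) 0 = _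
    rw [pvGetPairs_eq_counter gen1.toList, pvGetPairs_eq_counter gen2.toList,
        PySem.Dict.items_counter, List.foldl_map]
    simp only [PySem.Dict.contains_counter]
    rw [PySem.List.foldl_if_eq_foldl_filter, PySem.List.foldl_add, zero_add]
    exact congrArg List.sum (congrArg _ (List.filter_congr (fun x _ => by simp)))
  have hB : genomes_alt gen1 gen2
      = ((pvBigs gen1.toList).countP (fun k => decide (k ∈ pvBigs gen2.toList)) : Int) := by
    show (PySem.List.pyRange 0 (PySem.Chars.len gen1.toList - 1) 1).foldl
        (fun answer i =>
          if (PySem.Set.ofList (pvBigs gen2.toList)).contains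
              (PySem.List.slice gen1.toList (some i) (some (i + 2))) then answer + 1 else answer) 0 = _
    rw [PySem.List.foldl_if_add_one, zero_add]
    simp only [pvBigs, List.countP_map, Function.comp_def]
    exact congrArg _ (List.countP_congr (fun i _ => by simp [PySem.Set.mem_ofList]))
  rw [hA, hB, ← pvSum_count_eq_countP]

-- ===== VERDICT (by name: the statement is the Claim_ definition above) =====
theorem genomes_spec : Claim_equal_genomes := by
  intro gen1 gen2 _
  unfold Spec_genomes
  exact genomes_eq gen1 gen2
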